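-- pv_equiv track=rewrite | github.com/CompuCell3D/CompuCell3D | cc3d/core/ParameterScanUtils.py | nextIterationCartProd
-- ===== SOURCE A (Python) =====
-- def nextIterationCartProd(currentIteration, maxVals):
--     '''Computes next iteration of cartesian product
--     '''
--     length = len(currentIteration)
--     import copy
--
--     nextIteration = copy.deepcopy(currentIteration)
--
--     # print 'currentIteration=',currentIteration
--     # determine the lowest index with currentIteration value less than max value
--     idx = -1
--     for i in range(length):
--         if currentIteration[i] < maxVals[i]:
--             idx = i
--             break
--
--     if idx == -1:
--         return [0 for i in range(length)]  # rollover
--         # raise StopIteration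
--
--     # increment currentIteration for idx and zero iterations for i<idx
--     nextIteration[idx] += 1
--     # print 'currentIteration=',currentIteration
--
--     for i in range(idx):
--         nextIteration[i] = 0
--
--     return nextIteration
-- ===== SOURCE B (Python) =====
-- def nextIterationCartProd(currentIteration, maxVals):
--     """Structural head recursion with carry: an empty counter is its own next;
--     a head below its max is simply incremented; otherwise the head rolls to 0
--     and the carry recurses into the tail (the all-zero rollover emerges from
--     the recursion rather than being a separate case)."""
--     if not currentIteration:
--         return []
--     head, rest = currentIteration[0], currentIteration[1:]
--     if head < maxVals[0]:
--         return [head + 1] + rest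
--     return [0] + nextIterationCartProd(rest, maxVals[1:])
-- ===== Notes on version B (the rewrite author's own statement) =====
-- stated objective: simpler
-- what changed: B replaces A's search-for-idx pass over a deepcopy followed by a mutation pass by a structural head recursion with carry: the head is incremented if below its max, else zeroed with the carry recursing into the tails, so there is no index, no copy, no mutation and no explicit rollover case (all-zeros emerges from the recursion).
-- outside the precondition, e.g. on nextIterationCartProd([5], []): A raises IndexError, B raises IndexError
import Mathlib
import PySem

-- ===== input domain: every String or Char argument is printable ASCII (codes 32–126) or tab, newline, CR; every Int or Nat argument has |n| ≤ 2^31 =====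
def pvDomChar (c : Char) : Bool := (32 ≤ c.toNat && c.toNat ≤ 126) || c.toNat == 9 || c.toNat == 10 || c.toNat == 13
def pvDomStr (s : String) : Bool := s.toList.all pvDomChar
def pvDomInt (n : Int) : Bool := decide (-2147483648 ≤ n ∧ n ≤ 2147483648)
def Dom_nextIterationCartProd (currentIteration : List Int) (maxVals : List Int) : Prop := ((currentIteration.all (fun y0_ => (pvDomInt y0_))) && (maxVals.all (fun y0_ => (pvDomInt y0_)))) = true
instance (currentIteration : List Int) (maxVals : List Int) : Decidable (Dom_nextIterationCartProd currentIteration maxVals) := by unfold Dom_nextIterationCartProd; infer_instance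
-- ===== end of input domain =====

-- B replaces A's search-then-mutate (find idx over a deepcopy, then zero the prefix)
-- by a structural head recursion with carry; objective 'simpler'.

-- ===== PORT A =====
-- A's first loop ('for i in range(length): if currentIteration[i] < maxVals[i]: idx = i; break'),
-- returning the final idx (-1 if no break). Indexing via pyGetD is exact under Pre_ (in range).
def pvAScan (cur maxVals : List Int) (i : Nat) : Int :=
  if i < cur.length then
    if PySem.List.pyGetD cur (i : Int) 0 < PySem.List.pyGetD maxVals (i : Int) 0 then (i : Int)
    else pvAScan cur maxVals (i + 1)
  else -1
termination_by cur.length - i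

def nextIterationCartProd (currentIteration : List Int) (maxVals : List Int) : List Int :=
  let length := currentIteration.length
  let nextIteration := currentIteration   -- copy.deepcopy
  let idx := pvAScan currentIteration maxVals 0
  if idx = -1 then
    (PySem.List.pyRange 0 (length : Int) 1).map (fun _ => (0 : Int))   -- [0 for i in range(length)]
  else
    let nextIteration := nextIteration.set idx.toNat (PySem.List.pyGetD nextIteration idx 0 + 1)
    (PySem.List.pyRange 0 idx 1).foldl (fun acc i => acc.set i.toNat 0) nextIteration

-- ===== PORT B =====
-- B's head recursion: empty → []; head below its max → increment head; else 0 :: carry into tails.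
def nextIterationCartProd_alt (currentIteration : List Int) (maxVals : List Int) : List Int :=
  match currentIteration with
  | [] => []
  | head :: rest =>
    if head < PySem.List.pyGetD maxVals 0 0 then   -- maxVals[0]
      (head + 1) :: rest
    else
      0 :: nextIterationCartProd_alt rest (PySem.List.slice maxVals (some 1) none)   -- maxVals[1:]

-- ===== PRECONDITION & SPEC =====
-- Pre_ excludes exactly the inputs where the Python A raises IndexError: maxVals shorter than
-- currentIteration with no earlier position below its max (then the scan reads past maxVals).
def Pre_nextIterationCartProd (currentIteration : List Int) (maxVals : List Int) : Prop :=
  currentIteration.length ≤ maxVals.length ∨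
    ∃ i < min currentIteration.length maxVals.length,
      currentIteration.getD i 0 < maxVals.getD i 0
instance (currentIteration : List Int) (maxVals : List Int) : Decidable (Pre_nextIterationCartProd currentIteration maxVals) := by unfold Pre_nextIterationCartProd; infer_instance

def pvWitness_nextIterationCartProd : List Int × List Int := ([0, 1], [2, 2])

def Spec_nextIterationCartProd (currentIteration : List Int) (maxVals : List Int) (out : List Int) : Prop := out = nextIterationCartProd_alt currentIteration maxVals
instance (currentIteration : List Int) (maxVals : List Int) (out : List Int) : Decidable (Spec_nextIterationCartProd currentIteration maxVals out) := by unfold Spec_nextIterationCartProd; infer_instance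

-- ===== CLAIM (what is proved, stated in full; the proofs are below) =====
def Claim_equal_nextIterationCartProd : Prop := ∀ (currentIteration : List Int) (maxVals : List Int), Dom_nextIterationCartProd currentIteration maxVals → Pre_nextIterationCartProd currentIteration maxVals → Spec_nextIterationCartProd currentIteration maxVals (nextIterationCartProd currentIteration maxVals)

-- ===== LEMMAS AND PROOFS =====

-- The scan returns -1 or a cast Nat j with i ≤ j < cur.length that is the first hit.
lemma pvAScan_cases (cur maxVals : List Int) (i : Nat) :
    pvAScan cur maxVals i = -1 ∨
      ∃ j : Nat, pvAScan cur maxVals i = (j : Int) ∧ i ≤ j ∧ j < cur.length := by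
  fun_induction pvAScan cur maxVals i with
  | case1 i hi hlt => exact Or.inr ⟨i, rfl, le_refl i, hi⟩
  | case2 i hi hlt ih =>
    rcases ih with h | ⟨j, hj, hij, hjl⟩
    · exact Or.inl h
    · exact Or.inr ⟨j, hj, by omega, hjl⟩
  | case3 i hi => exact Or.inl rfl

-- Indexing a cons / a tail one position later (proof helpers).
lemma pyGetD_cons_shift (c : Int) (cs : List Int) (i : Nat) :
    PySem.List.pyGetD (c :: cs) ((i : Int) + 1) 0 = PySem.List.pyGetD cs (i : Int) 0 := by
  rw [show ((i : Int) + 1) = ((i + 1 : Nat) : Int) by push_cast; ring,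
      PySem.List.pyGetD_natCast, PySem.List.pyGetD_natCast]
  exact List.getD_cons_succ

lemma pyGetD_tail_shift (ms : List Int) (i : Nat) :
    PySem.List.pyGetD ms ((i : Int) + 1) 0 = PySem.List.pyGetD ms.tail (i : Int) 0 := by
  cases ms with
  | nil => simp [PySem.List.pyGetD, PySem.List.pyGet?]
  | cons m t =>
    simp only [List.tail_cons]
    rw [show ((i : Int) + 1) = ((i + 1 : Nat) : Int) by push_cast; ring,
        PySem.List.pyGetD_natCast, PySem.List.pyGetD_natCast]
    exact List.getD_cons_succ

-- Shifting the scan past a consumed head: scanning c::cs from i+1 is scanning cs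
-- against maxVals.tail from i, with the result index shifted by one.
lemma pvAScan_shift (c : Int) (cs ms : List Int) (i : Nat) :
    pvAScan (c :: cs) ms (i + 1) =
      (if pvAScan cs ms.tail i = -1 then -1 else pvAScan cs ms.tail i + 1) := by
  fun_induction pvAScan cs ms.tail i with
  | case1 i hi hlt =>
    rw [pvAScan]
    simp only [Nat.cast_add, Nat.cast_one, List.length_cons, pyGetD_tail_shift, List.tail_cons]
    rw [if_pos (by omega), if_pos hlt, if_neg (by omega : ((i : Nat) : Int) ≠ -1)]
  | case2 i hi hlt ih =>
    rw [pvAScan]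
    simp only [Nat.cast_add, Nat.cast_one, List.length_cons, pyGetD_tail_shift, List.tail_cons]
    rw [if_pos (by omega), if_neg hlt]
    exact ih
  | case3 i hi =>
    rw [pvAScan]
    rw [if_neg (by simp; omega)]
    simp

-- B's recursion computes A's post-processing of the scan result.
lemma alt_eq (cur ms : List Int) :
    nextIterationCartProd_alt cur ms =
      (if pvAScan cur ms 0 = -1 then List.replicate cur.length 0
       else
         List.replicate (pvAScan cur ms 0).toNat 0
           ++ [PySem.List.pyGetD cur (pvAScan cur ms 0) 0 + 1]
           ++ cur.drop ((pvAScan cur ms 0).toNat + 1)) := by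
  induction cur generalizing ms with
  | nil => rw [pvAScan]; simp [nextIterationCartProd_alt]
  | cons c cs ih =>
    rw [nextIterationCartProd_alt, pvAScan]
    simp only [Nat.cast_zero, List.length_cons, PySem.List.pyGetD_zero_cons]
    by_cases hlt : c < PySem.List.pyGetD ms 0 0
    · rw [if_pos hlt, if_pos hlt, if_pos (show 0 < cs.length + 1 by omega),
          if_neg (by norm_num : ¬ ((0 : Int) = -1))]
      simp [PySem.List.pyGetD_zero_cons]
    · rw [if_neg hlt, if_neg hlt, if_pos (show 0 < cs.length + 1 by omega),
          PySem.List.slice_from_one, ih ms.tail, pvAScan_shift]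
      rcases pvAScan_cases cs ms.tail 0 with h | ⟨j, hj, _, hjl⟩
      · rw [h]; simp [List.replicate_succ]
      · rw [hj, if_neg (by omega : ¬ (((j : Nat) : Int) = -1)),
            if_neg (by omega : ¬ (((j : Nat) : Int) = -1)),
            if_neg (by omega : ¬ (((j : Nat) : Int) + 1 = -1))]
        have h1 : (((j : Nat) : Int) + 1).toNat = j + 1 := by omega
        have h2 : ((j : Nat) : Int).toNat = j := by omega
        rw [h1, h2, pyGetD_cons_shift]
        simp [List.replicate_succ]

-- A's zeroing loop over range(j) turns the first j entries into zeros.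
lemma zero_fold (j : Nat) (l : List Int) (h : j ≤ l.length) :
    (PySem.List.pyRange 0 (j : Int) 1).foldl (fun acc i => acc.set i.toNat 0) l
      = List.replicate j 0 ++ l.drop j := by
  induction j with
  | zero => simp [PySem.List.pyRange_one_eq_nil]
  | succ j ih =>
    have hj : j ≤ l.length := by omega
    have hcast : ((j + 1 : Nat) : Int) = (j : Int) + 1 := by push_cast; ring
    rw [hcast, PySem.List.pyRange_one_succ_right (by omega : (0:Int) ≤ (j:Int)),
        List.foldl_append, ih hj]
    simp only [List.foldl_cons, List.foldl_nil]
    have hjt : ((j : Int)).toNat = j := by omega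
    rw [hjt, List.set_append, if_neg (by simp), List.length_replicate, Nat.sub_self,
        List.drop_eq_getElem_cons (by omega : j < l.length)]
    simp only [List.replicate_succ', List.append_assoc, List.nil_append, List.cons_append]
    rw [List.set_cons_zero]

-- ===== VERDICT (by name: the statement is the Claim_ definition above) =====
theorem nextIterationCartProd_spec : Claim_equal_nextIterationCartProd := by
  intro cur maxVals _ _
  unfold Spec_nextIterationCartProd nextIterationCartProd
  rw [alt_eq]
  rcases pvAScan_cases cur maxVals 0 with h | ⟨j, hj, _, hjl⟩
  · rw [h]
    simp [List.map_const', PySem.List.length_pyRange_one]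
  · rw [hj]
    have hne : ((j : Int)) ≠ -1 := by omega
    rw [if_neg hne, if_neg hne]
    have hjt : ((j : Int)).toNat = j := by omega
    rw [hjt]
    rw [zero_fold j _ (by simp; omega)]
    have hdrop : (cur.set j (PySem.List.pyGetD cur (j : Int) 0 + 1)).drop j
        = (PySem.List.pyGetD cur (j : Int) 0 + 1) :: cur.drop (j + 1) := by
      rw [List.drop_set, if_neg (by omega), Nat.sub_self,
          List.drop_eq_getElem_cons hjl, List.set_cons_zero]
    rw [hdrop]
    simp
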